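-- pv_equiv track=rewrite | github.com/omarkishak/All-Solved-Problems | LeetCode_Problem_1929_Solution_2.py | getConcatenation
-- ===== SOURCE A (Python) =====
-- def getConcatenation(nums):
--     rtrnNums = [0] * (len(nums) * 2)
--     l = 0
--     for i in range(len(rtrnNums)):
--         rtrnNums[i] = nums[l]
--         l += 1
--         if l == len(nums):
--             l = 0
--     return rtrnNums
-- ===== SOURCE B (Python) =====
-- def getConcatenation(nums):
--     return nums + nums
-- ===== Notes on version B (the rewrite author's own statement) =====
-- stated objective: simpler
-- what changed: Replaced the preallocate-and-fill loop with a cycling read index by a single list concatenation nums + nums.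
import Mathlib
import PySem

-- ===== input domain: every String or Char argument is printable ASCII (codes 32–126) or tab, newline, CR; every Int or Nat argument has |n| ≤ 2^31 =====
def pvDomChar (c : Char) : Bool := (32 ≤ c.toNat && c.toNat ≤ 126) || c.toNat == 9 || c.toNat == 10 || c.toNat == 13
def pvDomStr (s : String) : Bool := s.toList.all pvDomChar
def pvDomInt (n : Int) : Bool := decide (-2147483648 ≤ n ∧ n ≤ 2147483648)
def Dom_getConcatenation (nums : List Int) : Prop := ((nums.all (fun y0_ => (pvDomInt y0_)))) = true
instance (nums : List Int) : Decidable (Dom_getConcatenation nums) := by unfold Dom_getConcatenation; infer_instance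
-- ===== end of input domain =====

-- B replaces A's preallocate-and-fill loop (cycling read index) by a single concatenation nums ++ nums; simpler, same result.

-- ===== PORT A =====
-- the loop body: rtrnNums[i] = nums[l]; l += 1; if l == len(nums): l = 0
-- nums[l] is ported with pyGetD (default 0): the index l is always in range when the loop runs, so this is exact.
def getConcatenationStep (nums : List Int) (st : List Int × Int) (i : Int) : List Int × Int :=
  let r := st.1.set i.toNat (PySem.List.pyGetD nums st.2 0)
  let l := st.2 + 1
  (r, if l = (nums.length : Int) then 0 else l)

def getConcatenation (nums : List Int) : List Int :=
  let rtrnNums : List Int := List.replicate (nums.length * 2) 0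
  ((PySem.List.pyRange 0 ((rtrnNums.length : Nat) : Int) 1).foldl
    (getConcatenationStep nums) (rtrnNums, 0)).1

-- ===== PORT B =====
def getConcatenation_alt (nums : List Int) : List Int := nums ++ nums

-- ===== PRECONDITION & SPEC =====
def Spec_getConcatenation (nums : List Int) (out : List Int) : Prop := out = getConcatenation_alt nums
instance (nums : List Int) (out : List Int) : Decidable (Spec_getConcatenation nums out) := by unfold Spec_getConcatenation; infer_instance

-- ===== CLAIM (what is proved, stated in full; the proofs are below) =====
def Claim_equal_getConcatenation : Prop := ∀ (nums : List Int), Dom_getConcatenation nums → Spec_getConcatenation nums (getConcatenation nums)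

-- ===== LEMMAS AND PROOFS =====

lemma take_succ_set (r : List Int) (k : Nat) (v : Int) (h : k < r.length) :
    (r.set k v).take (k + 1) = r.take k ++ [v] := by
  rw [List.set_eq_take_append_cons_drop, if_pos h]
  have hk : (r.take k).length = k := List.length_take_of_le (le_of_lt h)
  rw [show k + 1 = (r.take k).length + 1 by rw [hk], List.take_append]
  simp

-- invariant of A's fill loop: starting at write position k with read index lN < |nums|,
-- m remaining steps overwrite positions k..k+m-1 with the cyclic continuation of nums from lN
lemma getConcatenation_loop_spec (nums : List Int) :
    ∀ (m k lN : Nat) (r : List Int),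
      lN < nums.length → r.length = k + m → m ≤ 2 * nums.length →
      ((PySem.List.pyRange (k : Int) ((k + m : Nat) : Int) 1).foldl
          (getConcatenationStep nums) (r, (lN : Int))).1
        = r.take k ++ List.take m (nums.drop lN ++ nums ++ nums) := by
  intro m
  induction m with
  | zero =>
      intro k lN r hl hr _
      rw [PySem.List.pyRange_one_eq_nil (by omega : ((k + 0 : Nat) : Int) ≤ (k : Int))]
      simp [List.take_of_length_le (by omega : r.length ≤ k)]
  | succ m ih =>
      intro k lN r hl hr hm
      rw [PySem.List.pyRange_one_cons (by push_cast; omega : (k : Int) < ((k + (m + 1) : Nat) : Int))]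
      have hkr : k < r.length := by omega
      have hstep : getConcatenationStep nums (r, (lN : Int)) (k : Int)
          = (r.set k nums[lN], if ((lN : Int) + 1) = (nums.length : Int) then 0 else (lN : Int) + 1) := by
        simp [getConcatenationStep, PySem.List.pyGetD_natCast, List.getElem?_eq_getElem hl]
      have hdrop : nums.drop lN = nums[lN] :: nums.drop (lN + 1) :=
        List.drop_eq_getElem_cons hl
      have hcast : ((k + (m + 1) : Nat) : Int) = (((k + 1) + m : Nat) : Int) := by push_cast; omega
      by_cases hwrap : lN + 1 = nums.length
      · -- read index wraps to 0
        have hif : (if ((lN : Int) + 1) = (nums.length : Int) then (0 : Int) else (lN : Int) + 1) = ((0 : Nat) : Int) := by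
          simp [show ((lN : Int) + 1) = (nums.length : Int) by exact_mod_cast congrArg (Nat.cast (R := Int)) hwrap]
        rw [List.foldl_cons, hstep, hif, hcast,
            show ((k : Int) + 1) = ((k + 1 : Nat) : Int) by push_cast; ring,
            ih (k + 1) 0 (r.set k nums[lN]) (by omega) (by simp [List.length_set]; omega) (by omega)]
        rw [take_succ_set r k nums[lN] hkr, hdrop, hwrap, List.drop_length]
        simp only [List.cons_append, List.nil_append, List.take_succ_cons, List.drop_zero,
          List.append_assoc]
        rw [← List.append_assoc, List.take_append_of_le_length
          (by simp; omega : m ≤ (nums ++ nums).length)]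
      · -- no wrap
        have hif : (if ((lN : Int) + 1) = (nums.length : Int) then (0 : Int) else (lN : Int) + 1) = ((lN + 1 : Nat) : Int) := by
          have : ((lN : Int) + 1) ≠ (nums.length : Int) := by
            intro h; exact hwrap (by exact_mod_cast h)
          simp [this]
        rw [List.foldl_cons, hstep, hif, hcast,
            show ((k : Int) + 1) = ((k + 1 : Nat) : Int) by push_cast; ring,
            ih (k + 1) (lN + 1) (r.set k nums[lN]) (by omega) (by simp [List.length_set]; omega) (by omega)]
        rw [take_succ_set r k nums[lN] hkr]
        conv_rhs => rw [hdrop]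
        simp only [List.cons_append, List.take_succ_cons, List.append_assoc, List.nil_append]

-- ===== VERDICT (by name: the statement is the Claim_ definition above) =====
theorem getConcatenation_spec : Claim_equal_getConcatenation := by
  intro nums _
  unfold Spec_getConcatenation getConcatenation getConcatenation_alt
  rcases Nat.eq_zero_or_pos nums.length with h0 | hpos
  · have : nums = [] := List.length_eq_zero_iff.mp h0
    subst this
    simp [PySem.List.pyRange_one_eq_nil]
  · have := getConcatenation_loop_spec nums (nums.length * 2) 0 0
      (List.replicate (nums.length * 2) 0) hpos (by simp) (by omega)
    simp only [Nat.zero_add, Nat.cast_zero] at this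
    simp only [List.length_replicate]
    rw [this]
    simp only [List.take_zero, List.nil_append, List.drop_zero]
    rw [show nums ++ nums ++ nums = (nums ++ nums) ++ nums from rfl]
    rw [List.take_append_of_le_length (by simp; omega)]
    rw [List.take_of_length_le (by simp; omega)]
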